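-- pv_equiv track=rewrite | github.com/Chisanan232/test-coverage-mcp | test-coverage-mcp/src/test_coverage_mcp/services/gap_discovery.py | _find_mixed_coverage_regions
-- ===== SOURCE A (Python) =====
-- from typing import Any, Dict, List, Optional
--
-- def _find_mixed_coverage_regions(
--     coverage_by_line: Dict[int, bool]
-- ) -> List[Dict[str, Any]]:
--     """Find regions with mixed coverage (some covered, some not).
--
--     Args:
--         coverage_by_line: Dictionary mapping line numbers to coverage status
--
--     Returns:
--         List of regions with mixed coverage
--     """
--     if not coverage_by_line:
--         return []
--
--     sorted_lines = sorted(coverage_by_line.keys())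
--     regions: List[Dict[str, Any]] = []
--     current_region_start = sorted_lines[0]
--     current_region_end = sorted_lines[0]
--     covered_count = 1 if coverage_by_line[sorted_lines[0]] else 0
--     uncovered_count = 0 if coverage_by_line[sorted_lines[0]] else 1
--
--     for line_num in sorted_lines[1:]:
--         if line_num == current_region_end + 1:
--             # Extend current region
--             current_region_end = line_num
--             if coverage_by_line[line_num]:
--                 covered_count += 1
--             else:
--                 uncovered_count += 1
--         else:
--             # Check if region has mixed coverage
--             if covered_count > 0 and uncovered_count > 0:
--                 regions.append(
--                     {
--                         "start": current_region_start,
--                         "end": current_region_end,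
--                         "covered": covered_count,
--                         "uncovered": uncovered_count,
--                     }
--                 )
--
--             # Start new region
--             current_region_start = line_num
--             current_region_end = line_num
--             covered_count = 1 if coverage_by_line[line_num] else 0
--             uncovered_count = 0 if coverage_by_line[line_num] else 1
--
--     # Check final region
--     if covered_count > 0 and uncovered_count > 0:
--         regions.append(
--             {
--                 "start": current_region_start,
--                 "end": current_region_end,
--                 "covered": covered_count,
--                 "uncovered": uncovered_count,
--             }
--         )
--
--     return regions
-- ===== SOURCE B (Python) =====
-- from typing import Any, Dict, List, Optional
--
-- def _region(coverage_by_line: Dict[int, bool], run: List[int]) -> Optional[Dict[str, Any]]: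
--     covered = sum(1 for l in run if coverage_by_line[l])
--     uncovered = len(run) - covered
--     if covered > 0 and uncovered > 0:
--         return {"start": run[0], "end": run[-1], "covered": covered, "uncovered": uncovered}
--     return None
--
-- def _find_mixed_coverage_regions(
--     coverage_by_line: Dict[int, bool]
-- ) -> List[Dict[str, Any]]:
--     lines = sorted(coverage_by_line.keys())
--     if not lines:
--         return []
--     # phase 1: materialize maximal contiguous runs
--     runs: List[List[int]] = []
--     cur = [lines[0]]
--     for ln in lines[1:]:
--         if ln == cur[-1] + 1:
--             cur.append(ln)
--         else:
--             runs.append(cur)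
--             cur = [ln]
--     runs.append(cur)
--     # phase 2: reduce each run to a region, keeping only mixed ones
--     return [r for r in (_region(coverage_by_line, run) for run in runs) if r is not None]
-- ===== Notes on version B (the rewrite author's own statement) =====
-- stated objective: alternative
-- what changed: Replaces A's single fused loop (which tracks start/end/covered/uncovered while scanning) by a two-phase decomposition: first materialize the maximal contiguous runs of sorted line numbers, then reduce each run independently to its covered/uncovered counts and keep the mixed ones.
import Mathlib
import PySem

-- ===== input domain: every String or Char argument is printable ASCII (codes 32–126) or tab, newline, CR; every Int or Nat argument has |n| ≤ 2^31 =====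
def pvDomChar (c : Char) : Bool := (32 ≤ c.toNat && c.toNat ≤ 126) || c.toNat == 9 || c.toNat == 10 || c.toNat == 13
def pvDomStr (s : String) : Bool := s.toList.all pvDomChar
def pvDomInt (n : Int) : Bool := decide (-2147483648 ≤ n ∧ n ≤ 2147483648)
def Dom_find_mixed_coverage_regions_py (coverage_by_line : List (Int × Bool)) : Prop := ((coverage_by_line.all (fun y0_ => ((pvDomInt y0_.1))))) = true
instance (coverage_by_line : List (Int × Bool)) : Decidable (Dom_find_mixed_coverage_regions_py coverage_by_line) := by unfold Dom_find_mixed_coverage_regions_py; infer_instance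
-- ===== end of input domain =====

-- B replaces A's fused accumulating loop by a two-phase segment-then-reduce pass (alternative decomposition, same cost).


-- ===== PORT A =====
-- shared by both ports: the Python dict and the four-key region dict literal (both Pythons build the same ones)
def pvMkRegion (s e cov unc : Int) : List (String × Int) :=
  [("start", s), ("end", e), ("covered", cov), ("uncovered", unc)]

-- A's fused loop over sorted_lines[1:], state = (start, end, covered, uncovered, regions)
def aLoop (d : PySem.Dict Int Bool) (xs : List Int) (s e cov unc : Int)
    (acc : List (List (String × Int))) : List (List (String × Int)) :=
  match xs with
  | [] => if cov > 0 ∧ unc > 0 then acc ++ [pvMkRegion s e cov unc] else acc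
  | y :: ys =>
    if y = e + 1 then
      aLoop d ys s y (if d.getD y false then cov + 1 else cov)
        (if d.getD y false then unc else unc + 1) acc
    else
      let acc' := if cov > 0 ∧ unc > 0 then acc ++ [pvMkRegion s e cov unc] else acc
      aLoop d ys y y (if d.getD y false then 1 else 0) (if d.getD y false then 0 else 1) acc'

def find_mixed_coverage_regions_py (coverage_by_line : List (Int × Bool)) : List (List (String × Int)) :=
  let d := PySem.Dict.ofList coverage_by_line
  match PySem.List.sorted d.keys id false with
  | [] => []
  | l0 :: rest =>
    aLoop d rest l0 l0 (if d.getD l0 false then 1 else 0) (if d.getD l0 false then 0 else 1) []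

-- ===== PORT B =====
-- phase 1: split the sorted lines into maximal contiguous runs (cur[-1] read as pyGetD cur (-1))
def bRunsLoop (acc : List (List Int)) (cur : List Int) (xs : List Int) : List (List Int) :=
  match xs with
  | [] => acc ++ [cur]
  | y :: ys =>
    if y = PySem.List.pyGetD cur (-1) 0 + 1 then bRunsLoop acc (cur ++ [y]) ys
    else bRunsLoop (acc ++ [cur]) [y] ys

-- phase 2: one run -> optionally a mixed region (B's _region helper)
def bRegion (d : PySem.Dict Int Bool) (run : List Int) : Option (List (String × Int)) :=
  let covered : Int := run.foldl (fun c l => if d.getD l false then c + 1 else c) 0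
  let uncovered : Int := (run.length : Int) - covered
  if covered > 0 ∧ uncovered > 0 then
    some (pvMkRegion (PySem.List.pyGetD run 0 0) (PySem.List.pyGetD run (-1) 0) covered uncovered)
  else none

def find_mixed_coverage_regions_py_alt (coverage_by_line : List (Int × Bool)) : List (List (String × Int)) :=
  let d := PySem.Dict.ofList coverage_by_line
  match PySem.List.sorted d.keys id false with
  | [] => []
  | l0 :: rest => (bRunsLoop [] [l0] rest).filterMap (fun run => bRegion d run)

-- ===== PRECONDITION & SPEC =====
def Spec_find_mixed_coverage_regions_py (coverage_by_line : List (Int × Bool)) (out : List (List (String × Int))) : Prop := out = find_mixed_coverage_regions_py_alt coverage_by_line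
instance (coverage_by_line : List (Int × Bool)) (out : List (List (String × Int))) : Decidable (Spec_find_mixed_coverage_regions_py coverage_by_line out) := by unfold Spec_find_mixed_coverage_regions_py; infer_instance

-- ===== CLAIM (what is proved, stated in full; the proofs are below) =====
def Claim_equal_find_mixed_coverage_regions_py : Prop := ∀ (coverage_by_line : List (Int × Bool)), Dom_find_mixed_coverage_regions_py coverage_by_line → Spec_find_mixed_coverage_regions_py coverage_by_line (find_mixed_coverage_regions_py coverage_by_line)

-- ===== LEMMAS AND PROOFS =====

-- accumulator-free version of bRunsLoop, for the induction
def bRuns (cur : List Int) (xs : List Int) : List (List Int) :=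
  match xs with
  | [] => [cur]
  | y :: ys =>
    if y = PySem.List.pyGetD cur (-1) 0 + 1 then bRuns (cur ++ [y]) ys
    else cur :: bRuns [y] ys

theorem bRunsLoop_eq (xs : List Int) : ∀ (acc : List (List Int)) (cur : List Int),
    bRunsLoop acc cur xs = acc ++ bRuns cur xs := by
  induction xs with
  | nil => intro acc cur; simp [bRunsLoop, bRuns]
  | cons y ys ih =>
    intro acc cur
    simp only [bRunsLoop, bRuns]
    split
    · exact ih acc (cur ++ [y])
    · rw [ih (acc ++ [cur]) [y]]; simp

-- the count B's foldl computes, as countP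
def pvCnt (d : PySem.Dict Int Bool) (run : List Int) : Int :=
  (run.countP (fun l => d.getD l false) : Int)

theorem pvCnt_append_one (d : PySem.Dict Int Bool) (run : List Int) (y : Int) :
    pvCnt d (run ++ [y]) = pvCnt d run + (if d.getD y false then 1 else 0) := by
  unfold pvCnt
  rw [List.countP_append, List.countP_cons, List.countP_nil]
  rcases d.getD y false with _ | _ <;> simp

theorem pvCnt_single (d : PySem.Dict Int Bool) (y : Int) :
    pvCnt d [y] = if d.getD y false then 1 else 0 := by
  unfold pvCnt
  rw [List.countP_cons, List.countP_nil]
  rcases d.getD y false with _ | _ <;> simp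

theorem bRegion_eq (d : PySem.Dict Int Bool) (run : List Int) (s e : Int)
    (hh : run.head? = some s) (hl : run.getLast? = some e) :
    bRegion d run = if pvCnt d run > 0 ∧ (run.length : Int) - pvCnt d run > 0
      then some (pvMkRegion s e (pvCnt d run) ((run.length : Int) - pvCnt d run)) else none := by
  have hne : run ≠ [] := by rintro rfl; simp at hh
  unfold bRegion
  rw [PySem.List.foldl_count_if (fun l => d.getD l false) run 0]
  have hs : PySem.List.pyGetD run 0 0 = s := by
    rw [PySem.List.pyGetD_zero]
    cases run with
    | nil => simp at hh
    | cons a t => simp only [List.head?_cons, Option.some.injEq] at hh; simpa using hh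
  have he : PySem.List.pyGetD run (-1) 0 = e := by
    rw [PySem.List.pyGetD_neg_one run 0 hne]
    rw [List.getLast?_eq_some_getLast hne] at hl
    exact Option.some.injEq _ _ |>.mp hl
  simp only [zero_add, hs, he, pvCnt]

-- main invariant: A's fused loop = emitted prefix ++ reduce of the remaining runs
theorem main_inv (d : PySem.Dict Int Bool) (xs : List Int) : ∀ (run : List Int) (s e : Int)
    (acc : List (List (String × Int))),
    run.head? = some s → run.getLast? = some e →
    aLoop d xs s e (pvCnt d run) ((run.length : Int) - pvCnt d run) acc
      = acc ++ (bRuns run xs).filterMap (fun r => bRegion d r) := by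
  induction xs with
  | nil =>
    intro run s e acc hh hl
    simp only [aLoop, bRuns, List.filterMap_cons, List.filterMap_nil]
    rw [bRegion_eq d run s e hh hl]
    split <;> simp
  | cons y ys ih =>
    intro run s e acc hh hl
    have hne : run ≠ [] := by rintro rfl; simp at hh
    have he : PySem.List.pyGetD run (-1) 0 = e := by
      rw [PySem.List.pyGetD_neg_one run 0 hne]
      rw [List.getLast?_eq_some_getLast hne] at hl
      exact Option.some.injEq _ _ |>.mp hl
    simp only [aLoop, bRuns, he]
    by_cases hy : y = e + 1
    · simp only [if_pos hy]
      have hh' : (run ++ [y]).head? = some s := by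
        cases run with
        | nil => exact absurd rfl hne
        | cons a t => simpa using hh
      have hl' : (run ++ [y]).getLast? = some y := by simp
      have H := ih (run ++ [y]) s y acc hh' hl'
      rw [pvCnt_append_one] at H
      have e1 : (if d.getD y false = true then pvCnt d run + 1 else pvCnt d run)
          = pvCnt d run + (if d.getD y false = true then (1:Int) else 0) := by split <;> ring
      have e2 : (if d.getD y false = true then (↑run.length : Int) - pvCnt d run
            else (↑run.length : Int) - pvCnt d run + 1)
          = (↑(run ++ [y]).length : Int) - (pvCnt d run + (if d.getD y false = true then (1:Int) else 0)) := by
        simp only [List.length_append, List.length_cons, List.length_nil]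
        split <;> push_cast <;> ring
      rw [e1, e2]
      exact H
    · simp only [if_neg hy, List.filterMap_cons]
      rw [bRegion_eq d run s e hh hl]
      have H := ih [y] y y
        (if pvCnt d run > 0 ∧ (↑run.length : Int) - pvCnt d run > 0
          then acc ++ [pvMkRegion s e (pvCnt d run) ((↑run.length : Int) - pvCnt d run)] else acc)
        (by simp) (by simp)
      rw [pvCnt_single] at H
      have e3 : (if d.getD y false = true then (0:Int) else 1)
          = (↑([y] : List Int).length : Int) - (if d.getD y false = true then (1:Int) else 0) := by
        simp only [List.length_cons, List.length_nil]
        split <;> norm_num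
      rw [e3, H]
      split <;> simp

-- ===== VERDICT (by name: the statement is the Claim_ definition above) =====
theorem find_mixed_coverage_regions_py_spec : Claim_equal_find_mixed_coverage_regions_py := by
  unfold Claim_equal_find_mixed_coverage_regions_py
  intro cov _
  unfold Spec_find_mixed_coverage_regions_py
  simp only [find_mixed_coverage_regions_py, find_mixed_coverage_regions_py_alt]
  cases h : PySem.List.sorted (PySem.Dict.ofList cov).keys id false with
  | nil => rfl
  | cons l0 rest =>
    dsimp only
    rw [bRunsLoop_eq rest [] [l0]]
    have H := main_inv (PySem.Dict.ofList cov) rest [l0] l0 l0 [] (by simp) (by simp)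
    rw [pvCnt_single] at H
    have e3 : (if (PySem.Dict.ofList cov).getD l0 false = true then (0:Int) else 1)
        = (↑([l0] : List Int).length : Int) - (if (PySem.Dict.ofList cov).getD l0 false = true then (1:Int) else 0) := by
      simp only [List.length_cons, List.length_nil]
      split <;> norm_num
    rw [e3, H]
    simp
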